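-- pv_equiv track=rewrite | github.com/sewonK/CodingTest | Python/백준/1343_폴리오미노.py | checkCnt
-- ===== SOURCE A (Python) =====
-- def checkCnt(cnt):
--     result = ''
--     cnt_A = 0
--     cnt_B = 0
--     while(cnt > 0):
--         if cnt % 4 == 0:
--             cnt_A += (cnt//4)
--             cnt %= 4
--         elif cnt % 2 == 0:
--             cnt_B += 1
--             cnt -= 2
--         else:
--             return result
--     for _ in range(cnt_A):
--         result += 'AAAA'
--     for _ in range(cnt_B):
--         result += 'BB'
--     return result
-- ===== SOURCE B (Python) =====
-- def checkCnt(cnt):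
--     if cnt <= 0 or cnt % 2 != 0:
--         return ''
--     return 'AAAA' * (cnt // 4) + 'BB' * ((cnt % 4) // 2)
-- ===== Notes on version B (the rewrite author's own statement) =====
-- stated objective: simpler
-- what changed: Replaced the while-loop with branch-dependent counters plus two append loops by a guard and a closed-form string expression 'AAAA'*(cnt//4) + 'BB'*((cnt%4)//2).
import Mathlib
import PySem

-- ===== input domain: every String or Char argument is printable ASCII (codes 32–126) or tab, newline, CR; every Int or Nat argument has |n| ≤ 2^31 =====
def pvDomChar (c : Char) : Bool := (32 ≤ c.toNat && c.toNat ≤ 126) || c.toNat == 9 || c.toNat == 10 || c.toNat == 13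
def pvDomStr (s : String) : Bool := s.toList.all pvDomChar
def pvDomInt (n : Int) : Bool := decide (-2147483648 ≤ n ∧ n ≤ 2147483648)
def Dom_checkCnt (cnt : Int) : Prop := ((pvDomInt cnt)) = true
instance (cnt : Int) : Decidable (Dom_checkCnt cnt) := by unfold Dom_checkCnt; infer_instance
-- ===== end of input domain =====

-- B replaces A's while-loop with counters and two append loops by a guard plus a
-- closed-form string expression (objective: simpler).

-- ===== PORT A =====
-- the while-loop of A, carrying result, cnt_A, cnt_B; on exit the two append loops run
def checkCntLoop (cnt cntA cntB : Int) (result : String) : String :=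
  if hpos : cnt > 0 then
    if h4 : PySem.Int.mod cnt 4 = 0 then
      checkCntLoop (PySem.Int.mod cnt 4) (cntA + PySem.Int.floordiv cnt 4) cntB result
    else if h2 : PySem.Int.mod cnt 2 = 0 then
      checkCntLoop (cnt - 2) cntA (cntB + 1) result
    else result
  else
    (PySem.List.pyRange 0 cntB 1).foldl (fun acc _ => acc ++ "BB")
      ((PySem.List.pyRange 0 cntA 1).foldl (fun acc _ => acc ++ "AAAA") result)
termination_by cnt.toNat
decreasing_by
  · simp only [h4]; omega
  · omega

def checkCnt (cnt : Int) : String := checkCntLoop cnt 0 0 ""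

-- ===== PORT B =====
-- 'AAAA' * n  (Python string repetition, empty for n ≤ 0)
def pyStrMul (s : String) (n : Int) : String := String.join (List.replicate n.toNat s)

def checkCnt_alt (cnt : Int) : String :=
  if cnt ≤ 0 ∨ PySem.Int.mod cnt 2 ≠ 0 then ""
  else pyStrMul "AAAA" (PySem.Int.floordiv cnt 4)
       ++ pyStrMul "BB" (PySem.Int.floordiv (PySem.Int.mod cnt 4) 2)

-- ===== PRECONDITION & SPEC =====
def Spec_checkCnt (cnt : Int) (out : String) : Prop := out = checkCnt_alt cnt
instance (cnt : Int) (out : String) : Decidable (Spec_checkCnt cnt out) := by unfold Spec_checkCnt; infer_instance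

-- ===== CLAIM (what is proved, stated in full; the proofs are below) =====
def Claim_equal_checkCnt : Prop := ∀ (cnt : Int), Dom_checkCnt cnt → Spec_checkCnt cnt (checkCnt cnt)

-- ===== LEMMAS AND PROOFS =====

-- appending s once per element of l equals appending l.length copies of s
theorem foldl_append_hoist (l : List String) (a : String) :
    l.foldl (fun r s => r ++ s) a = a ++ l.foldl (fun r s => r ++ s) "" := by
  induction l generalizing a with
  | nil => simp
  | cons x xs ih =>
    simp only [List.foldl_cons]
    rw [ih (a ++ x), ih ("" ++ x)]
    simp [String.append_assoc]

theorem join_cons (x : String) (l : List String) :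
    String.join (x :: l) = x ++ String.join l := by
  simp only [String.join, List.foldl_cons, String.empty_append]
  exact foldl_append_hoist l x

theorem foldl_append_rep {α : Type} (l : List α) (s acc : String) :
    l.foldl (fun a (_ : α) => a ++ s) acc = acc ++ String.join (List.replicate l.length s) := by
  induction l generalizing acc with
  | nil => simp [String.join]
  | cons x xs ih =>
    simp only [List.foldl_cons, List.length_cons, ih, List.replicate_succ, join_cons,
      String.append_assoc]

theorem checkCntLoop_exit (cntA cntB : Int) (c : Int) (hc : ¬ c > 0) :
    checkCntLoop c cntA cntB "" =
      pyStrMul "AAAA" cntA ++ pyStrMul "BB" cntB := by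
  rw [checkCntLoop]
  simp only [hc, dite_false]
  rw [foldl_append_rep, foldl_append_rep]
  simp [pyStrMul, PySem.List.length_pyRange_one]

theorem mod_four (cnt : Int) : PySem.Int.mod cnt 4 = cnt % 4 :=
  PySem.Int.mod_eq_emod_of_pos (by norm_num)

theorem mod_two (cnt : Int) : PySem.Int.mod cnt 2 = cnt % 2 :=
  PySem.Int.mod_eq_emod_of_pos (by norm_num)

theorem checkCnt_spec : Claim_equal_checkCnt := by
  intro cnt _
  unfold Spec_checkCnt checkCnt checkCnt_alt
  by_cases hpos : cnt > 0
  · rw [checkCntLoop]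
    simp only [hpos, dite_true]
    by_cases h4 : PySem.Int.mod cnt 4 = 0
    · -- cnt ≡ 0 (mod 4): one loop step sets cnt to 0 and cnt_A to cnt//4
      simp only [h4, dite_true]
      rw [checkCntLoop_exit _ _ 0 (by omega)]
      have h2 : PySem.Int.mod cnt 2 = 0 := by
        rw [mod_two]; rw [mod_four] at h4; omega
      simp only [h2]
      rw [if_neg (by omega : ¬ (cnt ≤ 0 ∨ (0:Int) ≠ 0))]
      simp
    · by_cases h2 : PySem.Int.mod cnt 2 = 0
      · -- cnt ≡ 2 (mod 4): one BB step, then either exit (cnt = 2) or an AAAA step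
        simp only [h4, h2, dite_true, dite_false]
        rw [if_neg (by omega : ¬ (cnt ≤ 0 ∨ (0:Int) ≠ 0))]
        rw [mod_four] at h4
        rw [mod_two] at h2
        have hm4 : cnt % 4 = 2 := by omega
        have hbb : PySem.Int.floordiv (PySem.Int.mod cnt 4) 2 = 1 := by
          rw [mod_four, hm4]; decide
        rw [hbb]
        by_cases h2' : cnt = 2
        · subst h2'
          rw [(by norm_num : (2:Int) - 2 = 0), checkCntLoop_exit _ _ 0 (by omega)]
          decide
        · -- cnt ≥ 4: cnt - 2 > 0 and (cnt - 2) % 4 = 0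
          rw [checkCntLoop]
          have hp2 : cnt - 2 > 0 := by omega
          have h40 : PySem.Int.mod (cnt - 2) 4 = 0 := by rw [mod_four]; omega
          simp only [hp2, h40, dite_true]
          rw [checkCntLoop_exit _ _ 0 (by omega)]
          have hdiv : PySem.Int.floordiv (cnt - 2) 4 = PySem.Int.floordiv cnt 4 := by
            rw [PySem.Int.floordiv_eq_ediv_of_pos (by norm_num),
                PySem.Int.floordiv_eq_ediv_of_pos (by norm_num)]
            omega
          rw [hdiv]
          simp [pyStrMul, String.join]
      · -- cnt odd: immediate return of the (still empty) result
        simp only [h4, h2, dite_false]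
        rw [mod_two] at h2
        rw [if_pos (by rw [mod_two]; omega)]
  · -- cnt ≤ 0: loop never runs, both counters are 0
    rw [checkCntLoop_exit _ _ cnt hpos]
    rw [if_pos (by omega)]
    decide
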